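-- pv_equiv track=rewrite | github.com/yash-marathe/Primus | primus/backends/megatron/core/pipeline_parallel/zerobubble/scheduler/v_auto_schedule.py | calc_bubble
-- ===== SOURCE A (Python) =====
-- def calc_bubble(schedules):
--     stage_bubbles = []
--     for i in range(len(schedules)):
--         max_len = 0
--         count = 0
--         for j in range(len(schedules[i])):
--             if schedules[i][j] != " ":
--                 max_len = j + 1
--                 count += 1
--         stage_bubbles.append(max_len - count - i)
--     return stage_bubbles
-- ===== SOURCE B (Python) =====
-- def calc_bubble(schedules):
--     out = []
--     for i, s in enumerate(schedules):
--         k = len(s)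
--         while k > 0 and s[k - 1] == " ":
--             k -= 1
--         out.append(sum(1 for x in s[:k] if x == " ") - i)
--     return out
-- ===== Notes on version B (the rewrite author's own statement) =====
-- stated objective: simpler
-- what changed: Instead of a forward scan maintaining max_len and count, B right-strips trailing spaces and counts the spaces that remain, using the identity max_len - count = number of spaces before the last non-space.
import Mathlib
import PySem

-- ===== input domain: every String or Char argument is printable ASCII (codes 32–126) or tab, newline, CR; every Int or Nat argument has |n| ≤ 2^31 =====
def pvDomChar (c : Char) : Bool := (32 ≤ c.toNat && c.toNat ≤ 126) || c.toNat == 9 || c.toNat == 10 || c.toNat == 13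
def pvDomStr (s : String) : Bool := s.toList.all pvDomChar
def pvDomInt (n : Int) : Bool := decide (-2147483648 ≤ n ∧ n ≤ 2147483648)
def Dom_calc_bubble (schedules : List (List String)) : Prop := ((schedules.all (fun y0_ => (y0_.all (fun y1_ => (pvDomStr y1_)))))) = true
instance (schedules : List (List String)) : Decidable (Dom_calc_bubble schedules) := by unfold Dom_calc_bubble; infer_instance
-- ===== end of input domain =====

-- B right-strips trailing spaces and counts the remaining spaces instead of A's forward
-- scan maintaining (max_len, count); objective: simpler (same value, same cost).

-- ===== PORT A =====
-- inner loop 'for j in range(len(schedules[i]))' iterates the elements with their index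
def calc_bubble (schedules : List (List String)) : List Int :=
  schedules.zipIdx.foldl
    (fun stage_bubbles si =>
      let p := si.1.zipIdx.foldl
        (fun (p : Int × Int) ja => if ja.1 ≠ " " then ((ja.2 : Int) + 1, p.2 + 1) else p)
        (0, 0)
      stage_bubbles ++ [p.1 - p.2 - (si.2 : Int)])
    []

-- ===== PORT B =====
-- the while-loop 'while k > 0 and s[k-1] == " ": k -= 1' followed by s[:k]
def pvRstrip (s : List String) : List String := (s.reverse.dropWhile (· == " ")).reverse

def calc_bubble_alt (schedules : List (List String)) : List Int :=
  schedules.zipIdx.map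
    (fun si => ((pvRstrip si.1).countP (· == " ") : Int) - (si.2 : Int))

-- ===== PRECONDITION & SPEC =====
def Spec_calc_bubble (schedules : List (List String)) (out : List Int) : Prop := out = calc_bubble_alt schedules
instance (schedules : List (List String)) (out : List Int) : Decidable (Spec_calc_bubble schedules out) := by unfold Spec_calc_bubble; infer_instance

-- ===== CLAIM (what is proved, stated in full; the proofs are below) =====
def Claim_equal_calc_bubble : Prop := ∀ (schedules : List (List String)), Dom_calc_bubble schedules → Spec_calc_bubble schedules (calc_bubble schedules)

-- ===== LEMMAS AND PROOFS =====

-- accumulate-by-append equals map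
theorem pv_foldl_snoc_map {α : Type} (f : α → Int) :
    ∀ (l : List α) (acc : List Int),
      l.foldl (fun a x => a ++ [f x]) acc = acc ++ l.map f := by
  intro l
  induction l with
  | nil => simp
  | cons x xs ih => intro acc; simp [List.foldl_cons, ih]

-- A's inner fold computes (length of the right-stripped list, number of non-spaces)
theorem pv_inner_char (s : List String) :
    s.zipIdx.foldl
      (fun (p : Int × Int) ja => if ja.1 ≠ " " then ((ja.2 : Int) + 1, p.2 + 1) else p)
      (0, 0)
    = (((pvRstrip s).length : Int), (s.countP (· != " ") : Int)) := by
  induction s using List.reverseRecOn with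
  | nil => simp [pvRstrip]
  | append_singleton xs a ih =>
      rw [List.zipIdx_append, List.foldl_append, ih]
      by_cases h : a = " "
      · subst h
        simp [pvRstrip]
      · have hb : (a == " ") = false := by simp [h]
        simp only [List.zipIdx, List.foldl_cons, List.foldl_nil, if_pos h]
        simp [pvRstrip, hb, List.countP_append, h]

-- counting non-spaces ignores the stripped trailing spaces
theorem pv_countP_rstrip (s : List String) :
    (pvRstrip s).countP (· != " ") = s.countP (· != " ") := by
  unfold pvRstrip
  rw [List.countP_reverse]
  conv_rhs => rw [← List.countP_reverse, ← List.takeWhile_append_dropWhile (p := (· == " ")) (l := s.reverse)]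
  rw [List.countP_append]
  have h0 : (s.reverse.takeWhile (· == " ")).countP (· != " ") = 0 := by
    rw [List.countP_eq_zero]
    intro x hx
    have := List.mem_takeWhile_imp hx
    simpa using this
  omega

-- a list's length splits into its spaces and its non-spaces
theorem pv_len_split (l : List String) :
    l.length = l.countP (· == " ") + l.countP (· != " ") := by
  induction l with
  | nil => simp
  | cons x xs ih =>
      by_cases h : x = " " <;> simp [h, ih] <;> omega

theorem calc_bubble_spec : Claim_equal_calc_bubble := by
  intro schedules _
  unfold Spec_calc_bubble calc_bubble calc_bubble_alt
  rw [pv_foldl_snoc_map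
    (f := fun si : List String × Nat =>
      (si.1.zipIdx.foldl
        (fun (p : Int × Int) ja => if ja.1 ≠ " " then ((ja.2 : Int) + 1, p.2 + 1) else p)
        (0, 0)).1
      - (si.1.zipIdx.foldl
        (fun (p : Int × Int) ja => if ja.1 ≠ " " then ((ja.2 : Int) + 1, p.2 + 1) else p)
        (0, 0)).2 - (si.2 : Int))]
  simp only [List.nil_append]
  apply List.map_congr_left
  intro si _
  rw [pv_inner_char]
  have h1 := pv_countP_rstrip si.1
  have h2 := pv_len_split (pvRstrip si.1)
  simp only []
  omega
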